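-- pv_equiv track=rewrite | github.com/pyrosoda/planner_of_plana | BA Planner/v6/core/scanner.py | _count_row_overlap
-- ===== SOURCE A (Python) =====
-- def _count_row_overlap(
--     before_hashes: list[str],
--     after_hashes: list[str],
--     grid_cols: int,
-- ) -> int:
--     if grid_cols <= 0:
--         return 0
--     before_rows = [
--         tuple(before_hashes[i:i + grid_cols])
--         for i in range(0, len(before_hashes), grid_cols)
--         if len(before_hashes[i:i + grid_cols]) == grid_cols
--     ]
--     after_rows = [
--         tuple(after_hashes[i:i + grid_cols])
--         for i in range(0, len(after_hashes), grid_cols)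
--         if len(after_hashes[i:i + grid_cols]) == grid_cols
--     ]
--     max_rows = min(len(before_rows), len(after_rows))
--     for overlap in range(max_rows, 0, -1):
--         if before_rows[-overlap:] == after_rows[:overlap]:
--             return overlap
--     return 0
-- ===== SOURCE B (Python) =====
-- def _count_row_overlap(
--     before_hashes: list[str],
--     after_hashes: list[str],
--     grid_cols: int,
-- ) -> int:
--     if grid_cols <= 0:
--         return 0
--     before_rows = [
--         tuple(before_hashes[i:i + grid_cols])
--         for i in range(0, len(before_hashes), grid_cols)
--         if len(before_hashes[i:i + grid_cols]) == grid_cols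
--     ]
--     after_rows = [
--         tuple(after_hashes[i:i + grid_cols])
--         for i in range(0, len(after_hashes), grid_cols)
--         if len(after_hashes[i:i + grid_cols]) == grid_cols
--     ]
--     # KMP prefix function over after_rows + [None] + before_rows (rows as symbols;
--     # None is a separator that equals no row).  The final prefix-function value is
--     # the longest suffix of before_rows that is a prefix of after_rows.
--     seq = [*after_rows, None, *before_rows]
--     pi = [0] * len(seq)
--     k = 0
--     for i in range(1, len(seq)):
--         while k > 0 and seq[i] != seq[k]:
--             k = pi[k - 1]
--         if seq[i] == seq[k]:
--             k += 1
--         pi[i] = k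
--     return pi[-1]
-- ===== Notes on version B (the rewrite author's own statement) =====
-- stated objective: alternative
-- what changed: A searches candidate overlaps descending, re-comparing a length-k row-suffix against a length-k row-prefix for each k; B instead runs a single KMP prefix-function pass over after_rows + [None] + before_rows (rows as symbols) and returns the final prefix-function value; it trades A's repeated slice comparisons (quadratic in the worst case, but fast when the largest candidate matches) for one linear matching pass.
import Mathlib
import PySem

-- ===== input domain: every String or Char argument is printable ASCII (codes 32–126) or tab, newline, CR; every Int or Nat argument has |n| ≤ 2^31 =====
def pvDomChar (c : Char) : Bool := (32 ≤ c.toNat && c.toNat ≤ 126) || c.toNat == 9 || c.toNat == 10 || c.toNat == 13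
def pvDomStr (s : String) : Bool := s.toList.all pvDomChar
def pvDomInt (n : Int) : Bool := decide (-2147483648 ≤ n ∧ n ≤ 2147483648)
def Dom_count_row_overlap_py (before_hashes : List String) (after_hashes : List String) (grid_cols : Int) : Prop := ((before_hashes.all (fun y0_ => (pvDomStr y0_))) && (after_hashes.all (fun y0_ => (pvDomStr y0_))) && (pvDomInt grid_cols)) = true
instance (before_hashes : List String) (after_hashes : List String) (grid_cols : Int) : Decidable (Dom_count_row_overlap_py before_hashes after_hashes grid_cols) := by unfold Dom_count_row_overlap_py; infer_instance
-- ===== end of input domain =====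

-- B replaces A's descending suffix-vs-prefix slice scan by a single KMP prefix-function
-- pass over after_rows ++ [sep] ++ before_rows (rows as symbols): a different algorithm.

-- ===== PORT A =====
-- shared by both ports: the identical row-chunking comprehension both Pythons contain
def pvRows (hs : List String) (g : Int) : List (List String) :=
  (PySem.List.pyRange 0 (hs.length : Int) g).filterMap (fun i =>
    let r := PySem.List.slice hs (some i) (some (i + g))
    if (r.length : Int) = g then some r else none)

-- A's 'for overlap in range(max_rows, 0, -1): if …: return overlap' / 'return 0'
def pvFindOverlapA (bR aR : List (List String)) : List Int → Int
  | [] => 0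
  | k :: rest =>
    if PySem.List.slice bR (some (-k)) none = PySem.List.slice aR none (some k) then k
    else pvFindOverlapA bR aR rest

def count_row_overlap_py (before_hashes : List String) (after_hashes : List String) (grid_cols : Int) : Int :=
  if grid_cols ≤ 0 then 0
  else
    let before_rows := pvRows before_hashes grid_cols
    let after_rows := pvRows after_hashes grid_cols
    let max_rows : Nat := min before_rows.length after_rows.length
    pvFindOverlapA before_rows after_rows (PySem.List.pyRange (max_rows : Int) 0 (-1))

-- ===== PORT B =====
-- B's 'while k > 0 and seq[i] != seq[k]: k = pi[k-1]'; fuel = the initial k (k strictly decreases)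
def pvDescend (s : List (Option (List String))) (pi : List Nat) (c : Option (List String)) :
    Nat → Nat → Nat
  | 0, k => k
  | fuel + 1, k =>
    if k ≠ 0 ∧ s.getD k none ≠ c then pvDescend s pi c fuel (pi.getD (k - 1) 0) else k

-- one iteration of B's 'for i in range(1, len(seq))' loop body
def pvKmpStep (s : List (Option (List String))) (st : List Nat × Nat) (i : Nat) :
    List Nat × Nat :=
  let c := s.getD i none
  let k1 := pvDescend s st.1 c st.2 st.2
  let k2 := if c = s.getD k1 none then k1 + 1 else k1
  (st.1 ++ [k2], k2)

-- B's prefix-function array pi (pi[0] = 0; entries appended in order)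
def pvPi (s : List (Option (List String))) : List Nat :=
  (((List.range (s.length - 1)).map (· + 1)).foldl (pvKmpStep s) ([0], 0)).1

def count_row_overlap_py_alt (before_hashes : List String) (after_hashes : List String) (grid_cols : Int) : Int :=
  if grid_cols ≤ 0 then 0
  else
    let before_rows := pvRows before_hashes grid_cols
    let after_rows := pvRows after_hashes grid_cols
    let seq : List (Option (List String)) :=
      after_rows.map some ++ none :: before_rows.map some
    ((pvPi seq).getLastD 0 : Int)

-- ===== PRECONDITION & SPEC =====
def Spec_count_row_overlap_py (before_hashes : List String) (after_hashes : List String) (grid_cols : Int) (out : Int) : Prop := out = count_row_overlap_py_alt before_hashes after_hashes grid_cols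
instance (before_hashes : List String) (after_hashes : List String) (grid_cols : Int) (out : Int) : Decidable (Spec_count_row_overlap_py before_hashes after_hashes grid_cols out) := by unfold Spec_count_row_overlap_py; infer_instance

-- ===== CLAIM (what is proved, stated in full; the proofs are below) =====
def Claim_equal_count_row_overlap_py : Prop := ∀ (before_hashes : List String) (after_hashes : List String) (grid_cols : Int), Dom_count_row_overlap_py before_hashes after_hashes grid_cols → Spec_count_row_overlap_py before_hashes after_hashes grid_cols (count_row_overlap_py before_hashes after_hashes grid_cols)

-- ===== LEMMAS AND PROOFS =====

-- proper border: the first k symbols of t equal its last k symbols, k < |t|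
def pvBrd (t : List (Option (List String))) (k : Nat) : Bool :=
  decide (k < t.length) && decide (t.take k = t.drop (t.length - k))

-- longest proper border length
def pvLb (t : List (Option (List String))) : Nat :=
  Nat.findGreatest (fun k => pvBrd t k = true) (t.length - 1)

-- overlap k is valid: the last k rows of bR are the first k rows of aR
def pvValid (bR aR : List (List String)) (k : Nat) : Bool :=
  decide (bR.drop (bR.length - k) = aR.take k)

lemma pvBrd_lt {t : List (Option (List String))} {k : Nat} (h : pvBrd t k = true) :
    k < t.length := by
  simp [pvBrd] at h; exact h.1

lemma pvBrd_zero {t : List (Option (List String))} (h : t ≠ []) : pvBrd t 0 = true := by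
  simp [pvBrd, List.drop_length]
  exact List.length_pos_of_ne_nil h

lemma pvBrd_append_succ (t : List (Option (List String))) (c : Option (List String)) (k : Nat) :
    pvBrd (t ++ [c]) (k + 1) = true ↔ pvBrd t k = true ∧ t[k]? = some c := by
  simp only [pvBrd, Bool.and_eq_true, decide_eq_true_eq, List.length_append, List.length_cons,
    List.length_nil]
  constructor
  · rintro ⟨h1, h2⟩
    have hk : k < t.length := by omega
    rw [List.take_append_of_le_length (by omega)] at h2
    have hd : t.length + 0 + 1 - (k + 1) = t.length - k := by omega
    rw [hd, List.drop_append_of_le_length (by omega),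
      List.take_succ_eq_append_getElem hk] at h2
    have hlen : (t.take k).length = (t.drop (t.length - k)).length := by
      simp; omega
    obtain ⟨he1, he2⟩ := List.append_inj h2 (by simpa using hlen)
    refine ⟨⟨hk, he1⟩, ?_⟩
    rw [List.getElem?_eq_getElem hk]
    simpa using he2
  · rintro ⟨⟨hk, he⟩, hget⟩
    have hgk : t[k]'hk = c := by
      rw [List.getElem?_eq_getElem hk] at hget; simpa using hget
    refine ⟨by omega, ?_⟩
    rw [List.take_append_of_le_length (by omega)]
    have hd : t.length + 0 + 1 - (k + 1) = t.length - k := by omega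
    rw [hd, List.drop_append_of_le_length (by omega),
      List.take_succ_eq_append_getElem hk, he, hgk]

lemma pvBrd_chain_down {t : List (Option (List String))} {j k : Nat}
    (hj : pvBrd t j = true) (hk : pvBrd t k = true) (hjk : j < k) :
    pvBrd (t.take k) j = true := by
  simp only [pvBrd, Bool.and_eq_true, decide_eq_true_eq] at *
  obtain ⟨hj1, hj2⟩ := hj
  obtain ⟨hk1, hk2⟩ := hk
  have hlen : (t.take k).length = k := by simp; omega
  refine ⟨by omega, ?_⟩
  rw [hlen, List.take_take, min_eq_left (by omega), hk2, List.drop_drop]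
  have : t.length - k + (k - j) = t.length - j := by omega
  rw [this]
  exact hj2

lemma pvBrd_chain_up {t : List (Option (List String))} {j k : Nat}
    (hk : pvBrd t k = true) (hj : pvBrd (t.take k) j = true) :
    pvBrd t j = true := by
  simp only [pvBrd, Bool.and_eq_true, decide_eq_true_eq] at *
  obtain ⟨hk1, hk2⟩ := hk
  have hlen : (t.take k).length = k := by simp; omega
  rw [hlen] at hj
  obtain ⟨hj1, hj2⟩ := hj
  rw [List.take_take, min_eq_left (by omega), hk2, List.drop_drop] at hj2
  have : t.length - k + (k - j) = t.length - j := by omega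
  rw [this] at hj2
  exact ⟨by omega, hj2⟩

lemma pvLb_brd {t : List (Option (List String))} (h : t ≠ []) : pvBrd t (pvLb t) = true := by
  unfold pvLb
  exact Nat.findGreatest_spec (P := fun k => pvBrd t k = true) (Nat.zero_le _) (pvBrd_zero h)

lemma pvBrd_le_lb {t : List (Option (List String))} {j : Nat} (h : pvBrd t j = true) :
    j ≤ pvLb t := by
  unfold pvLb
  exact Nat.le_findGreatest (P := fun k => pvBrd t k = true) (by have := pvBrd_lt h; omega) h

lemma pvDescend_spec (s : List (Option (List String))) (i : Nat) (_h0 : 0 < i)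
    (hi : i < s.length) (pi : List Nat)
    (hpi : ∀ j, j < i → pi.getD j 0 = pvLb (s.take (j + 1))) :
    ∀ fuel k, k ≤ fuel → pvBrd (s.take i) k = true →
      pvBrd (s.take i) (pvDescend s pi (s.getD i none) fuel k) = true ∧
      (pvDescend s pi (s.getD i none) fuel k = 0 ∨
        s.getD (pvDescend s pi (s.getD i none) fuel k) none = s.getD i none) ∧
      (∀ j, pvBrd (s.take i) j = true → j ≤ k → s.getD j none = s.getD i none →
        j ≤ pvDescend s pi (s.getD i none) fuel k) := by
  intro fuel
  induction fuel with
  | zero =>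
    intro k hk hbrd
    interval_cases k
    exact ⟨hbrd, Or.inl rfl, fun j _ hj _ => hj⟩
  | succ fuel ih =>
    intro k hk hbrd
    have hti : (s.take i).length = i := by simp; omega
    by_cases hcond : k ≠ 0 ∧ s.getD k none ≠ s.getD i none
    · have hklt : k < i := by have := pvBrd_lt hbrd; omega
      have hkpos : 0 < k := Nat.pos_of_ne_zero hcond.1
      have htk : (s.take i).take k = s.take k := by
        rw [List.take_take, min_eq_left (by omega)]
      have hpik : pi.getD (k - 1) 0 = pvLb (s.take k) := by
        have := hpi (k - 1) (by omega)
        rwa [Nat.sub_add_cancel hkpos] at this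
      have hne : s.take k ≠ [] := by
        have : (s.take k).length = k := by simp; omega
        intro h; rw [h] at this; simp at this; omega
      have hbrdk' : pvBrd (s.take k) (pvLb (s.take k)) = true := pvLb_brd hne
      have hk'lt : pvLb (s.take k) < k := by
        have := pvBrd_lt hbrdk'
        have hl : (s.take k).length = k := by simp; omega
        omega
      have hbrdt : pvBrd (s.take i) (pvLb (s.take k)) = true := by
        apply pvBrd_chain_up hbrd
        rw [htk]; exact hbrdk'
      have hstep : pvDescend s pi (s.getD i none) (fuel+1) k
          = pvDescend s pi (s.getD i none) fuel (pvLb (s.take k)) := by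
        simp only [pvDescend]
        rw [if_pos hcond, hpik]
      rw [hstep]
      obtain ⟨ha, hb, hc⟩ := ih (pvLb (s.take k)) (by omega) hbrdt
      refine ⟨ha, hb, fun j hj hjk hjc => ?_⟩
      have hjne : j ≠ k := fun he => hcond.2 (he ▸ hjc)
      have : pvBrd ((s.take i).take k) j = true := pvBrd_chain_down hj hbrd (by omega)
      rw [htk] at this
      exact hc j hj (pvBrd_le_lb this) hjc
    · have hstep : pvDescend s pi (s.getD i none) (fuel+1) k = k := by
        simp only [pvDescend]
        rw [if_neg hcond]
      rw [hstep]
      refine ⟨hbrd, ?_, fun j _ hj _ => hj⟩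
      by_cases hz : k = 0
      · exact Or.inl hz
      · right
        by_contra hne2
        exact hcond ⟨hz, hne2⟩

lemma pvKmpStep_spec (s : List (Option (List String))) (i : Nat) (h0 : 0 < i)
    (hi : i < s.length) (pi : List Nat)
    (hpi : ∀ j, j < i → pi.getD j 0 = pvLb (s.take (j + 1))) :
    (pvKmpStep s (pi, pvLb (s.take i)) i).2 = pvLb (s.take (i + 1)) := by
  have hti : (s.take i).length = i := by simp; omega
  have htne : s.take i ≠ [] := by
    intro h; rw [h] at hti; simp at hti; omega
  have hbrd0 : pvBrd (s.take i) (pvLb (s.take i)) = true := pvLb_brd htne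
  obtain ⟨ha, hb, hc⟩ := pvDescend_spec s i h0 hi pi hpi (pvLb (s.take i)) (pvLb (s.take i))
    le_rfl hbrd0
  set K := pvDescend s pi (s.getD i none) (pvLb (s.take i)) (pvLb (s.take i)) with hK
  have hKlt : K < i := by have := pvBrd_lt ha; omega
  have hgetK : (s.take i)[K]? = s[K]? := List.getElem?_take_of_lt (by omega)
  have hgetKd : s.getD K none = s[K]'(by omega) := List.getD_eq_getElem s none (by omega)
  have hgetid : s.getD i none = s[i]'hi := List.getD_eq_getElem s none hi
  have htake : s.take (i + 1) = s.take i ++ [s[i]'hi] := List.take_succ_eq_append_getElem hi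
  have hlen1 : (s.take (i+1)).length = i+1 := by simp; omega
  have htne' : s.take (i+1) ≠ [] := List.ne_nil_of_length_pos (by omega)
  simp only [pvKmpStep, ← hK]
  by_cases heq : s.getD i none = s.getD K none
  · rw [if_pos heq]
    have hgetc : (s.take i)[K]? = some (s[i]'hi) := by
      rw [hgetK, List.getElem?_eq_getElem (by omega : K < s.length)]
      rw [← hgetKd, ← heq, hgetid]
    have hbrdsucc : pvBrd (s.take (i+1)) (K+1) = true := by
      rw [htake]
      exact (pvBrd_append_succ _ _ _).mpr ⟨ha, hgetc⟩
    have le1 : K + 1 ≤ pvLb (s.take (i+1)) := pvBrd_le_lb hbrdsucc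
    have hbrdL : pvBrd (s.take (i+1)) (pvLb (s.take (i+1))) = true := pvLb_brd htne'
    have le2 : pvLb (s.take (i+1)) ≤ K + 1 := by
      cases hL : pvLb (s.take (i+1)) with
      | zero => omega
      | succ j =>
        rw [hL, htake] at hbrdL
        obtain ⟨hbj, hgetj⟩ := (pvBrd_append_succ _ _ _).mp hbrdL
        have hjlt : j < i := by have := pvBrd_lt hbj; omega
        have hjget : s.getD j none = s.getD i none := by
          rw [List.getElem?_take_of_lt hjlt, List.getElem?_eq_getElem (by omega : j < s.length)]
            at hgetj
          rw [List.getD_eq_getElem s none (by omega : j < s.length), hgetid]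
          simpa using hgetj
        have := hc j hbj (pvBrd_le_lb hbj) hjget
        omega
    omega
  · rw [if_neg heq]
    have hK0 : K = 0 := by
      rcases hb with h | h
      · exact h
      · exact absurd h.symm heq
    have hbrdL : pvBrd (s.take (i+1)) (pvLb (s.take (i+1))) = true := pvLb_brd htne'
    cases hL : pvLb (s.take (i+1)) with
    | zero => omega
    | succ j =>
      exfalso
      rw [hL, htake] at hbrdL
      obtain ⟨hbj, hgetj⟩ := (pvBrd_append_succ _ _ _).mp hbrdL
      have hjlt : j < i := by have := pvBrd_lt hbj; omega
      have hjget : s.getD j none = s.getD i none := by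
        rw [List.getElem?_take_of_lt hjlt, List.getElem?_eq_getElem (by omega : j < s.length)]
          at hgetj
        rw [List.getD_eq_getElem s none (by omega : j < s.length), hgetid]
        simpa using hgetj
      have hjK := hc j hbj (pvBrd_le_lb hbj) hjget
      have hj0 : j = 0 := by omega
      apply heq
      rw [hK0, ← hj0, ← hjget]

lemma pvPi_inv (s : List (Option (List String))) (n : Nat) (hn : n < s.length) :
    (((List.range n).map (· + 1)).foldl (pvKmpStep s) ([0], 0)).1.length = n + 1 ∧
    (∀ j, j ≤ n →
      (((List.range n).map (· + 1)).foldl (pvKmpStep s) ([0], 0)).1.getD j 0 =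
        pvLb (s.take (j + 1))) ∧
    (((List.range n).map (· + 1)).foldl (pvKmpStep s) ([0], 0)).2 =
      pvLb (s.take (n + 1)) := by
  induction n with
  | zero =>
    have hlb1 : pvLb (s.take 1) = 0 := by
      unfold pvLb
      have : (s.take 1).length = 1 := by simp; omega
      rw [this]
      simp [Nat.findGreatest]
    refine ⟨by simp, ?_, by simpa using hlb1.symm⟩
    intro j hj
    interval_cases j
    simpa using hlb1.symm
  | succ n ih =>
    obtain ⟨ihlen, ihget, ihk⟩ := ih (by omega)
    rw [List.range_succ, List.map_append, List.foldl_append]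
    set prev := ((List.range n).map (· + 1)).foldl (pvKmpStep s) ([0], 0) with hprev
    have hprev2 : prev = (prev.1, prev.2) := rfl
    have hpi : ∀ j, j < n + 1 → prev.1.getD j 0 = pvLb (s.take (j + 1)) := by
      intro j hj; exact ihget j (by omega)
    have hstep := pvKmpStep_spec s (n + 1) (by omega) hn prev.1 hpi
    rw [← ihk, ← hprev2] at hstep
    simp only [List.map_cons, List.map_nil, List.foldl_cons, List.foldl_nil]
    refine ⟨?_, ?_, ?_⟩
    · simp [pvKmpStep, ihlen]
    · intro j hj
      by_cases hjn : j ≤ n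
      · have : (pvKmpStep s prev (n+1)).1.getD j 0 = prev.1.getD j 0 := by
          simp only [pvKmpStep]
          rw [List.getD_append _ _ _ _ (by omega)]
        rw [this]
        exact ihget j hjn
      · have hj1 : j = n + 1 := by omega
        subst hj1
        simp only [pvKmpStep]
        rw [List.getD_append_right _ _ _ _ (by omega)]
        simp [ihlen]
        rw [← hstep]
        simp [pvKmpStep]
    · exact hstep

lemma pvPi_last (s : List (Option (List String))) (hs : s ≠ []) :
    (pvPi s).getLastD 0 = pvLb s := by
  have hlen : 0 < s.length := List.length_pos_of_ne_nil hs
  obtain ⟨hl, hget, _⟩ := pvPi_inv s (s.length - 1) (by omega)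
  unfold pvPi
  have hgl : ∀ (l : List Nat) (d : Nat), l.getLastD d = l.getD (l.length - 1) d := by
    intro l d
    rw [List.getLastD_eq_getLast?, List.getLast?_eq_getElem?, List.getD_eq_getElem?_getD]
  rw [hgl, hl]
  have := hget (s.length - 1) le_rfl
  simp only [Nat.add_sub_cancel] at this ⊢
  rw [this]
  have h1 : s.length - 1 + 1 = s.length := by omega
  rw [h1, List.take_length]

lemma pvSep_index (bR aR : List (List String)) (j : Nat)
    (h : (aR.map some ++ none :: bR.map some)[j]? = some (none : Option (List String))) :
    j = aR.length := by
  rcases lt_trichotomy j aR.length with hlt | heq | hgt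
  · rw [List.getElem?_append_left (by simpa using hlt)] at h
    rw [List.getElem?_eq_getElem (by simpa using hlt)] at h
    simp at h
  · exact heq
  · exfalso
    rw [List.getElem?_append_right (by simp; omega)] at h
    simp only [List.length_map] at h
    have hj : j - aR.length = (j - aR.length - 1) + 1 := by omega
    rw [hj] at h
    simp only [List.getElem?_cons_succ] at h
    rw [List.getElem?_map] at h
    cases hx : bR[j - aR.length - 1]? with
    | none => rw [hx] at h; simp at h
    | some w => rw [hx] at h; simp at h

lemma pvTake_sep (bR aR : List (List String)) (k : Nat) (hk : k ≤ aR.length) :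
    (aR.map some ++ none :: bR.map some).take k = (aR.take k).map some := by
  rw [List.take_append_of_le_length (by simpa using hk), List.map_take]

lemma pvDrop_sep (bR aR : List (List String)) (k : Nat) (hk : k ≤ bR.length) :
    (aR.map some ++ none :: bR.map some).drop
        ((aR.map some ++ none :: bR.map some).length - k) =
      (bR.drop (bR.length - k)).map some := by
  have hlen : (aR.map some ++ none :: bR.map some).length = aR.length + (1 + bR.length) := by
    simp; omega
  have harith : (aR.map some ++ none :: bR.map some).length - k
      = aR.length + (1 + (bR.length - k)) := by rw [hlen]; omega
  rw [harith, List.drop_append]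
  have h1 : List.drop (aR.length + (1 + (bR.length - k))) (aR.map some) = [] :=
    List.drop_eq_nil_of_le (by simp)
  have h2 : aR.length + (1 + (bR.length - k)) - (aR.map some).length
      = (bR.length - k) + 1 := by simp; omega
  rw [h1, h2, List.drop_succ_cons, List.map_drop, List.nil_append]

lemma pvBrd_sep_iff (bR aR : List (List String)) (k : Nat) :
    pvBrd (aR.map some ++ none :: bR.map some) k = true ↔
      k ≤ min aR.length bR.length ∧ pvValid bR aR k = true := by
  set s := aR.map some ++ none :: bR.map some with hs
  have hlen : s.length = aR.length + 1 + bR.length := by simp [hs]; omega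
  constructor
  · intro h
    simp only [pvBrd, Bool.and_eq_true, decide_eq_true_eq] at h
    obtain ⟨hk, heq⟩ := h
    -- first: k ≤ aR.length ∧ k ≤ bR.length
    have hkk : k ≤ aR.length ∧ k ≤ bR.length := by
      by_contra hcon
      -- none occurs in one side iff k exceeds that bound; positions force k = s.length
      have hgt : aR.length < k ∨ bR.length < k := by omega
      -- none ∈ take k ↔ aR.length < k
      have htakeN : (none : Option (List String)) ∈ s.take k ↔ aR.length < k := by
        constructor
        · intro hm
          by_contra hle
          rw [pvTake_sep bR aR k (by omega)] at hm
          rcases List.mem_map.mp hm with ⟨w, _, hw⟩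
          simp at hw
        · intro hlt
          have : (s.take k)[aR.length]? = some none := by
            rw [List.getElem?_take_of_lt hlt, hs, List.getElem?_append_right (by simp)]
            simp
          exact List.mem_of_getElem? this
      have hdropN : (none : Option (List String)) ∈ s.drop (s.length - k) ↔ bR.length < k := by
        constructor
        · intro hm
          by_contra hle
          rw [pvDrop_sep bR aR k (by omega)] at hm
          rcases List.mem_map.mp hm with ⟨w, _, hw⟩
          simp at hw
        · intro hlt
          have hidx : s.length - k + (aR.length - (s.length - k)) = aR.length := by omega
          have : (s.drop (s.length - k))[aR.length - (s.length - k)]? = some none := by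
            rw [List.getElem?_drop, hidx, hs, List.getElem?_append_right (by simp)]
            simp
          exact List.mem_of_getElem? this
      have hmemeq : ((none : Option (List String)) ∈ s.take k) ↔
          ((none : Option (List String)) ∈ s.drop (s.length - k)) := by rw [heq]
      have hboth : aR.length < k ∧ bR.length < k := by
        rcases hgt with h1 | h1
        · exact ⟨h1, hdropN.mp (hmemeq.mp (htakeN.mpr h1))⟩
        · exact ⟨htakeN.mp (hmemeq.mpr (hdropN.mpr h1)), h1⟩
      -- now locate none in both sides at incompatible indices
      have htakeIdx : (s.take k)[aR.length]? = some none := by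
        rw [List.getElem?_take_of_lt hboth.1, hs, List.getElem?_append_right (by simp)]
        simp
      rw [heq] at htakeIdx
      rw [List.getElem?_drop] at htakeIdx
      have := pvSep_index bR aR _ (by rw [← hs]; exact htakeIdx)
      omega
    refine ⟨by omega, ?_⟩
    rw [pvTake_sep bR aR k (by omega), pvDrop_sep bR aR k (by omega)] at heq
    simp only [pvValid, decide_eq_true_eq]
    exact (List.map_injective_iff.mpr (Option.some_injective _)) heq.symm
  · rintro ⟨hk, hv⟩
    simp only [pvValid, decide_eq_true_eq] at hv
    simp only [pvBrd, Bool.and_eq_true, decide_eq_true_eq]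
    refine ⟨by omega, ?_⟩
    rw [pvTake_sep bR aR k (by omega), pvDrop_sep bR aR k (by omega), hv]

lemma pvLb_sep (bR aR : List (List String)) :
    pvLb (aR.map some ++ none :: bR.map some) =
      Nat.findGreatest (fun k => pvValid bR aR k = true) (min bR.length aR.length) := by
  have hne : (aR.map some ++ none :: bR.map some) ≠ ([] : List (Option (List String))) := by
    simp
  apply Nat.le_antisymm
  · obtain ⟨hle, hval⟩ := (pvBrd_sep_iff bR aR _).mp (pvLb_brd hne)
    exact Nat.le_findGreatest (by omega) hval
  · have hv0 : pvValid bR aR 0 = true := by simp [pvValid]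
    have hspec : pvValid bR aR (Nat.findGreatest (fun k => pvValid bR aR k = true)
        (min bR.length aR.length)) = true :=
      Nat.findGreatest_spec (P := fun k => pvValid bR aR k = true) (Nat.zero_le _) hv0
    have hle : Nat.findGreatest (fun k => pvValid bR aR k = true) (min bR.length aR.length)
        ≤ min bR.length aR.length := Nat.findGreatest_le _
    exact pvBrd_le_lb ((pvBrd_sep_iff bR aR _).mpr ⟨by omega, hspec⟩)

lemma pvPyRange_desc (n : Nat) :
    PySem.List.pyRange (n : Int) 0 (-1) = (List.range n).map (fun k : Nat => (n : Int) - (k : Int)) := by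
  rw [PySem.List.pyRange]
  norm_num
  rcases Nat.eq_zero_or_pos n with h | h
  · subst h; simp
  · rw [if_pos (by exact_mod_cast h)]
    apply List.map_congr_left
    intro k _
    ring

lemma pvRangeDesc_succ (n : Nat) :
    (List.range (n+1)).map (fun k : Nat => ((n+1 : Nat) : Int) - (k : Int)) =
      ((n+1 : Nat) : Int) :: (List.range n).map (fun k : Nat => (n : Int) - (k : Int)) := by
  rw [List.range_succ_eq_map, List.map_cons, List.map_map]
  refine congrArg₂ List.cons (by push_cast; ring) ?_
  apply List.map_congr_left
  intro k _
  simp only [Function.comp_apply]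
  push_cast
  ring

lemma pvFindOverlapA_eq (bR aR : List (List String)) (n : Nat) (hb : n ≤ bR.length)
    (ha : n ≤ aR.length) :
    pvFindOverlapA bR aR (PySem.List.pyRange (n : Int) 0 (-1)) =
      (Nat.findGreatest (fun k => pvValid bR aR k = true) n : Int) := by
  rw [pvPyRange_desc]
  induction n with
  | zero => simp [pvFindOverlapA]
  | succ n ih =>
    rw [pvRangeDesc_succ]
    simp only [pvFindOverlapA]
    have hslice1 : PySem.List.slice bR (some (-((n+1 : Nat) : Int))) none =
        bR.drop (bR.length - (n+1)) :=
      PySem.List.slice_from_neg_natCast (k := n+1) bR (by omega)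
    have hslice2 : PySem.List.slice aR none (some ((n+1 : Nat) : Int)) = aR.take (n+1) :=
      PySem.List.slice_to_natCast aR (n+1)
    rw [hslice1, hslice2]
    by_cases hcond : bR.drop (bR.length - (n+1)) = aR.take (n+1)
    · rw [if_pos hcond]
      have : Nat.findGreatest (fun k => pvValid bR aR k = true) (n+1) = n+1 := by
        rw [Nat.findGreatest_succ, if_pos (by simp [pvValid, hcond])]
      rw [this]
    · rw [if_neg hcond]
      rw [Nat.findGreatest_succ, if_neg (by simp [pvValid, hcond])]
      exact ih (by omega) (by omega)


-- ===== VERDICT (by name: the statement is the Claim_ definition above) =====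
theorem count_row_overlap_py_spec : Claim_equal_count_row_overlap_py := by
  intro b a g _dom
  unfold Spec_count_row_overlap_py count_row_overlap_py count_row_overlap_py_alt
  by_cases hg : g ≤ 0
  · simp [hg]
  · simp only [hg, if_false]
    set bR := pvRows b g
    set aR := pvRows a g
    have hs : (aR.map some ++ none :: bR.map some) ≠ ([] : List (Option (List String))) := by
      simp
    rw [pvFindOverlapA_eq bR aR (min bR.length aR.length) (Nat.min_le_left _ _)
      (Nat.min_le_right _ _), pvPi_last _ hs, pvLb_sep]
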